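-- pv_equiv track=rewrite | github.com/ErikP0/arithmetic-circuits-for-spn-primitives | MP-SPDZ code/aes.py | embed_helper
-- ===== SOURCE A (Python) =====
-- def embed_helper(in_bytes):
--     out_bytes = [None] * 8
--     out_bytes[0] = sum(in_bytes[0:8])
--     out_bytes[1] = sum(in_bytes[idx] for idx in range(1, 8, 2))
--     out_bytes[2] = in_bytes[2] + in_bytes[3] + in_bytes[6] + in_bytes[7]
--     out_bytes[3] = in_bytes[3] + in_bytes[7]
--     out_bytes[4] = in_bytes[4] + in_bytes[5] + in_bytes[6] + in_bytes[7]
--     out_bytes[5] = in_bytes[5] + in_bytes[7]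
--     out_bytes[6] = in_bytes[6] + in_bytes[7]
--     out_bytes[7] = in_bytes[7]
--     return out_bytes
-- ===== SOURCE B (Python) =====
-- def embed_helper(in_bytes):
--     out_bytes = []
--     for i in range(8):
--         acc = 0
--         for j in range(8):
--             if j & i == i:
--                 acc = acc + in_bytes[j]
--         out_bytes.append(acc)
--     return out_bytes
-- ===== Notes on version B (the rewrite author's own statement) =====
-- stated objective: simpler
-- what changed: Replaces the 8 hardcoded sum/index expressions with a uniform double loop using the bit condition (j & i) == i, which characterises exactly which input bytes feed each output byte.
import Mathlib
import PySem

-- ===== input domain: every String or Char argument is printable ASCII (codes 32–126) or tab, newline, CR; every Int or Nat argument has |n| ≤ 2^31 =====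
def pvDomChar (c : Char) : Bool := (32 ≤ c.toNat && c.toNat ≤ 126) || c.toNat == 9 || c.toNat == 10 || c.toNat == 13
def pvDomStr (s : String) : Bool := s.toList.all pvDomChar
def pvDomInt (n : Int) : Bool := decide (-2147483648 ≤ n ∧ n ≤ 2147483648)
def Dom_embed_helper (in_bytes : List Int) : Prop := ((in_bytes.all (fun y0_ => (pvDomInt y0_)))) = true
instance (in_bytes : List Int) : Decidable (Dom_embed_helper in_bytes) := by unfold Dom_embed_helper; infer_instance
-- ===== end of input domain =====

-- B replaces A's 8 hardcoded sum/index expressions with a uniform 8x8 double loop keyed by the bit condition (j & i) == i (objective: simpler).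

-- ===== PORT A =====
def embed_helper (in_bytes : List Int) : List Int :=
  -- out_bytes[0..7] assigned in order, returned as the list; in_bytes[idx] via pyGetD (total form; Pre_ keeps indices in range)
  [(PySem.List.slice in_bytes (some 0) (some 8)).sum,
   ((PySem.List.pyRange 1 8 2).map (fun idx => PySem.List.pyGetD in_bytes idx 0)).sum,
   PySem.List.pyGetD in_bytes 2 0 + PySem.List.pyGetD in_bytes 3 0 + PySem.List.pyGetD in_bytes 6 0 + PySem.List.pyGetD in_bytes 7 0,
   PySem.List.pyGetD in_bytes 3 0 + PySem.List.pyGetD in_bytes 7 0,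
   PySem.List.pyGetD in_bytes 4 0 + PySem.List.pyGetD in_bytes 5 0 + PySem.List.pyGetD in_bytes 6 0 + PySem.List.pyGetD in_bytes 7 0,
   PySem.List.pyGetD in_bytes 5 0 + PySem.List.pyGetD in_bytes 7 0,
   PySem.List.pyGetD in_bytes 6 0 + PySem.List.pyGetD in_bytes 7 0,
   PySem.List.pyGetD in_bytes 7 0]

-- ===== PORT B =====
def embed_helper_alt (in_bytes : List Int) : List Int :=
  (PySem.List.pyRange 0 8 1).map (fun i =>
    (PySem.List.pyRange 0 8 1).foldl (fun acc j =>
      if PySem.Int.band j i = i then acc + PySem.List.pyGetD in_bytes j 0 else acc) 0)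

-- ===== PRECONDITION & SPEC =====
-- A indexes in_bytes[2..7] directly (IndexError below 8 elements): Pre_ requires at least 8 elements.
def Pre_embed_helper (in_bytes : List Int) : Prop := 8 ≤ in_bytes.length
instance (in_bytes : List Int) : Decidable (Pre_embed_helper in_bytes) := by unfold Pre_embed_helper; infer_instance
def pvWitness_embed_helper : List Int := [1, 2, 3, 4, 5, 6, 7, 8]

def Spec_embed_helper (in_bytes : List Int) (out : List Int) : Prop := out = embed_helper_alt in_bytes
instance (in_bytes : List Int) (out : List Int) : Decidable (Spec_embed_helper in_bytes out) := by unfold Spec_embed_helper; infer_instance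

-- ===== CLAIM (what is proved, stated in full; the proofs are below) =====
def Claim_equal_embed_helper : Prop := ∀ (in_bytes : List Int), Dom_embed_helper in_bytes → Pre_embed_helper in_bytes → Spec_embed_helper in_bytes (embed_helper in_bytes)

-- ===== LEMMAS AND PROOFS =====

-- Both programs evaluated on a list with its first 8 elements exposed.
theorem embed_helper_key (a b c d e f g h : Int) (rest : List Int) :
    embed_helper (a :: b :: c :: d :: e :: f :: g :: h :: rest)
      = embed_helper_alt (a :: b :: c :: d :: e :: f :: g :: h :: rest) := by
  simp [embed_helper, embed_helper_alt,
        (show PySem.List.pyRange 1 8 2 = [1, 3, 5, 7] from by decide),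
        (show PySem.List.pyRange 0 8 1 = [0, 1, 2, 3, 4, 5, 6, 7] from by decide),
        PySem.List.pyGetD_ofNat', PySem.List.slice_to, List.foldl]
  simp [(show ¬ (PySem.Int.band 0 1 = (1:Int)) from by decide),
        (show ¬ (PySem.Int.band 2 1 = (1:Int)) from by decide),
        (show PySem.Int.band 3 1 = 1 from by decide),
        (show ¬ (PySem.Int.band 4 1 = (1:Int)) from by decide),
        (show PySem.Int.band 5 1 = 1 from by decide),
        (show ¬ (PySem.Int.band 6 1 = (1:Int)) from by decide),
        (show PySem.Int.band 7 1 = 1 from by decide),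
        (show ¬ (PySem.Int.band 0 2 = (2:Int)) from by decide),
        (show ¬ (PySem.Int.band 1 2 = (2:Int)) from by decide),
        (show PySem.Int.band 3 2 = 2 from by decide),
        (show ¬ (PySem.Int.band 4 2 = (2:Int)) from by decide),
        (show ¬ (PySem.Int.band 5 2 = (2:Int)) from by decide),
        (show PySem.Int.band 6 2 = 2 from by decide),
        (show PySem.Int.band 7 2 = 2 from by decide),
        (show ¬ (PySem.Int.band 0 3 = (3:Int)) from by decide),
        (show ¬ (PySem.Int.band 1 3 = (3:Int)) from by decide),
        (show ¬ (PySem.Int.band 2 3 = (3:Int)) from by decide),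
        (show ¬ (PySem.Int.band 4 3 = (3:Int)) from by decide),
        (show ¬ (PySem.Int.band 5 3 = (3:Int)) from by decide),
        (show ¬ (PySem.Int.band 6 3 = (3:Int)) from by decide),
        (show PySem.Int.band 7 3 = 3 from by decide),
        (show ¬ (PySem.Int.band 0 4 = (4:Int)) from by decide),
        (show ¬ (PySem.Int.band 1 4 = (4:Int)) from by decide),
        (show ¬ (PySem.Int.band 2 4 = (4:Int)) from by decide),
        (show ¬ (PySem.Int.band 3 4 = (4:Int)) from by decide),
        (show PySem.Int.band 5 4 = 4 from by decide),
        (show PySem.Int.band 6 4 = 4 from by decide),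
        (show PySem.Int.band 7 4 = 4 from by decide),
        (show ¬ (PySem.Int.band 0 5 = (5:Int)) from by decide),
        (show ¬ (PySem.Int.band 1 5 = (5:Int)) from by decide),
        (show ¬ (PySem.Int.band 2 5 = (5:Int)) from by decide),
        (show ¬ (PySem.Int.band 3 5 = (5:Int)) from by decide),
        (show ¬ (PySem.Int.band 4 5 = (5:Int)) from by decide),
        (show ¬ (PySem.Int.band 6 5 = (5:Int)) from by decide),
        (show PySem.Int.band 7 5 = 5 from by decide),
        (show ¬ (PySem.Int.band 0 6 = (6:Int)) from by decide),
        (show ¬ (PySem.Int.band 1 6 = (6:Int)) from by decide),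
        (show ¬ (PySem.Int.band 2 6 = (6:Int)) from by decide),
        (show ¬ (PySem.Int.band 3 6 = (6:Int)) from by decide),
        (show ¬ (PySem.Int.band 4 6 = (6:Int)) from by decide),
        (show ¬ (PySem.Int.band 5 6 = (6:Int)) from by decide),
        (show PySem.Int.band 7 6 = 6 from by decide),
        (show ¬ (PySem.Int.band 0 7 = (7:Int)) from by decide),
        (show ¬ (PySem.Int.band 1 7 = (7:Int)) from by decide),
        (show ¬ (PySem.Int.band 2 7 = (7:Int)) from by decide),
        (show ¬ (PySem.Int.band 3 7 = (7:Int)) from by decide),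
        (show ¬ (PySem.Int.band 4 7 = (7:Int)) from by decide),
        (show ¬ (PySem.Int.band 5 7 = (7:Int)) from by decide),
        (show ¬ (PySem.Int.band 6 7 = (7:Int)) from by decide)]
  and_intros <;> first | trivial | ring

-- ===== VERDICT (by name: the statement is the Claim_ definition above) =====
theorem embed_helper_spec : Claim_equal_embed_helper := by
  intro in_bytes _ hpre
  unfold Pre_embed_helper at hpre
  match in_bytes, hpre with
  | a :: b :: c :: d :: e :: f :: g :: h :: rest, _ =>
    exact embed_helper_key a b c d e f g h rest
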